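-- pv_equiv track=rewrite | github.com/Akiesmz/Learning-Assistant | backend/app/api/stats.py | _safe_namespace
-- ===== SOURCE A (Python) =====
-- def _safe_namespace(name: str) -> str:
--     s = (name or "").strip().lower()
--     if not s:
--         return "unknown"
--     out = []
--     for ch in s:
--         if ("a" <= ch <= "z") or ("0" <= ch <= "9") or ch in ("-", "_"):
--             out.append(ch)
--         else:
--             out.append("_")
--     return ("".join(out)[:64] or "unknown")
-- ===== SOURCE B (Python) =====
-- import re
--
-- def _safe_namespace(name: str) -> str:
--     s = (name or "").strip().lower()
--     if not s:
--         return "unknown"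
--     return re.sub(r'[^a-z0-9_-]', '_', s)[:64] or "unknown"
-- ===== Notes on version B (the rewrite author's own statement) =====
-- stated objective: faster
-- what changed: Replaces the explicit per-character Python loop (range comparisons + list accumulation + join) by a single C-level regex substitution with the character class [^a-z0-9_-], sliced to 64 chars; same O(n) but the per-character work moves into the regex engine.
import Mathlib
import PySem

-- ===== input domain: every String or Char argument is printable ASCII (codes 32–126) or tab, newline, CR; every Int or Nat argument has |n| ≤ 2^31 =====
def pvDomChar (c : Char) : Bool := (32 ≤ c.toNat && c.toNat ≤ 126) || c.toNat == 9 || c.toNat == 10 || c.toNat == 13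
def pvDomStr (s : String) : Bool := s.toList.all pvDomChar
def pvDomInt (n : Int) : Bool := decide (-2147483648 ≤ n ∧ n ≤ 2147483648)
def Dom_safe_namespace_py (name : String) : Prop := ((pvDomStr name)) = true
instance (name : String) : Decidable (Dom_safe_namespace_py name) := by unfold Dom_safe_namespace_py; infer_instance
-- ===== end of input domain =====

-- B replaces A's explicit per-character loop (range tests + list accumulation) by a single
-- regex substitution [^a-z0-9_-] → '_' followed by a [:64] slice; same result, more idiomatic.

-- ===== PORT A =====
def safe_namespace_py (name : String) : String :=
  let s := PySem.Str.lower (PySem.Str.strip (if name == "" then "" else name))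
  if s == "" then "unknown"
  else
    -- out = []; for ch in s: append ch if allowed else '_'
    let out : List Char := s.toList.foldl (fun acc ch =>
      if (decide ('a' ≤ ch) && decide (ch ≤ 'z')) || (decide ('0' ≤ ch) && decide (ch ≤ '9'))
         || ch == '-' || ch == '_'
      then acc ++ [ch] else acc ++ ['_']) []
    let j := PySem.Str.slice (String.ofList out) none (some 64)   -- "".join(out)[:64]
    if j == "" then "unknown" else j

-- ===== PORT B =====
-- re.sub(r'[^a-z0-9_-]', '_', s): ported as the corresponding map over the code points
-- (exact for this single-character class on the ASCII domain); [:64] is List.take 64.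
def pvSubClass (c : Char) : Char :=
  if (decide ('a' ≤ c) && decide (c ≤ 'z')) || (decide ('0' ≤ c) && decide (c ≤ '9'))
     || c == '_' || c == '-'
  then c else '_'

def safe_namespace_py_alt (name : String) : String :=
  let s := PySem.Str.lower (PySem.Str.strip (if name == "" then "" else name))
  if s == "" then "unknown"
  else
    let r := String.ofList ((s.toList.map pvSubClass).take 64)
    if r == "" then "unknown" else r

-- ===== PRECONDITION & SPEC =====
def Spec_safe_namespace_py (name : String) (out : String) : Prop := out = safe_namespace_py_alt name
instance (name : String) (out : String) : Decidable (Spec_safe_namespace_py name out) := by unfold Spec_safe_namespace_py; infer_instance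

-- ===== CLAIM (what is proved, stated in full; the proofs are below) =====
def Claim_equal_safe_namespace_py : Prop := ∀ (name : String), Dom_safe_namespace_py name → Spec_safe_namespace_py name (safe_namespace_py name)

-- ===== LEMMAS AND PROOFS =====

-- A's accumulator loop builds exactly the map of pvSubClass over the list.
theorem pv_fold_eq_map (l acc : List Char) :
    l.foldl (fun acc ch =>
      if (decide ('a' ≤ ch) && decide (ch ≤ 'z')) || (decide ('0' ≤ ch) && decide (ch ≤ '9'))
         || ch == '-' || ch == '_'
      then acc ++ [ch] else acc ++ ['_']) acc = acc ++ l.map pvSubClass := by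
  induction l generalizing acc with
  | nil => simp
  | cons c t ih =>
      simp only [List.foldl_cons, List.map_cons, ih, pvSubClass]
      by_cases h1 : (decide ('a' ≤ c) && decide (c ≤ 'z')) || (decide ('0' ≤ c) && decide (c ≤ '9'))
         || c == '-' || c == '_'
      · have h2 : ((decide ('a' ≤ c) && decide (c ≤ 'z')) || (decide ('0' ≤ c) && decide (c ≤ '9'))
            || c == '_' || c == '-') = true := by
          simp only [Bool.or_assoc, Bool.or_eq_true, beq_iff_eq] at h1 ⊢; tauto
        simp [h1, h2]
      · have h2 : ((decide ('a' ≤ c) && decide (c ≤ 'z')) || (decide ('0' ≤ c) && decide (c ≤ '9'))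
            || c == '_' || c == '-') = false := by
          simp only [Bool.or_assoc, Bool.or_eq_true, beq_iff_eq, not_or] at h1
          simp [h1.1, h1.2.1, h1.2.2.1, h1.2.2.2]
        simp [h1, h2]

-- s[:64] on the string side is take 64 on the list side.
theorem pv_slice64 (l : List Char) :
    PySem.Str.slice (String.ofList l) none (some 64) = String.ofList (l.take 64) := by
  apply String.toList_injective
  simp [PySem.Str.toList_slice]
  rw [show (64:Int) = ((64:Nat):Int) by norm_num, PySem.List.slice_to_natCast]

-- ===== VERDICT (by name: the statement is the Claim_ definition above) =====
theorem safe_namespace_py_spec : Claim_equal_safe_namespace_py := by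
  intro name _
  unfold Spec_safe_namespace_py safe_namespace_py safe_namespace_py_alt
  simp only []
  by_cases hs : (PySem.Str.lower (PySem.Str.strip (if name == "" then "" else name))) == ""
  · simp only [beq_iff_eq] at hs
    simp [hs]
  · simp only [hs, Bool.false_eq_true, if_false, pv_fold_eq_map, List.nil_append, pv_slice64]
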